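-- pv_equiv track=rewrite | github.com/mohitkumhar/leetcode_solution | 1332. Remove Palindromic Subsequences.py | removePalindromeSub
-- ===== SOURCE A (Python) =====
-- def removePalindromeSub(s: str) -> int:
--
--
--     s_list = list(s)
--
--     start = 0
--     end = len(s) - 1
--
--     while start <= end:
--         star = s_list[start]
--
--         s_list[start] = s_list[end]
--         s_list[end] = star
--
--         start += 1
--         end -= 1
--
--     if ''.join(s_list) == s:
--         return 1
--     return 2
-- ===== SOURCE B (Python) =====
-- def removePalindromeSub(s: str) -> int:
--     n = len(s)
--     return 1 if all(s[k] == s[n - 1 - k] for k in range(n // 2)) else 2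
-- ===== Notes on version B (the rewrite author's own statement) =====
-- stated objective: simpler
-- what changed: Replaces A's in-place swap-reversal of the whole list followed by a full string comparison with a one-line bulk check all(s[k] == s[n-1-k] for k in range(n//2)), avoiding the list copy/swap loop and short-circuiting on the first mismatch.
import Mathlib
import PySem

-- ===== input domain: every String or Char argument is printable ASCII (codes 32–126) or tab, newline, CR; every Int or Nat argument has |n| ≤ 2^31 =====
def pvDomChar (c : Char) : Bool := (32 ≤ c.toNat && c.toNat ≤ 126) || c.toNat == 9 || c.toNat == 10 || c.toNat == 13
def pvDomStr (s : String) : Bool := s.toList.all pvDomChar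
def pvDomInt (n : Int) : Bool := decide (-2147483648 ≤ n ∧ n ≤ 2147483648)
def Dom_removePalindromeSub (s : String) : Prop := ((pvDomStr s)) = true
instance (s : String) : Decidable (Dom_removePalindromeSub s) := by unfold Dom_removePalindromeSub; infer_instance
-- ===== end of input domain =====

-- B replaces A's swap-the-whole-list-then-compare reversal with a single bulk
-- `all` check of the mirrored pairs over the first half's indices; objective: simpler.

-- ===== PORT A =====
-- A's while loop: swap s_list[start] and s_list[end], move the pointers inward.
-- The guard `j < l.length` only makes the same computation total: Python's indices
-- are always in range when the loop body runs (start ≤ end ≤ len-1).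
def pvSwapLoop (l : List Char) (i j : Nat) : List Char :=
  if i ≤ j ∧ j < l.length then
    pvSwapLoop ((l.set i (l.getD j ' ')).set j (l.getD i ' ')) (i + 1) (j - 1)
  else l
termination_by j + 1 - i
decreasing_by simp_all; omega

def removePalindromeSub (s : String) : Int :=
  if pvSwapLoop s.toList 0 (s.toList.length - 1) = s.toList then 1 else 2

-- ===== PORT B =====
-- Source B: `1 if all(s[k] == s[n-1-k] for k in range(n // 2)) else 2`
def removePalindromeSub_alt (s : String) : Int :=
  let l := s.toList
  let n := l.length
  if (List.range (n / 2)).all (fun k => l.getD k ' ' == l.getD (n - 1 - k) ' ') then 1 else 2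

-- ===== PRECONDITION & SPEC =====
def Spec_removePalindromeSub (s : String) (out : Int) : Prop := out = removePalindromeSub_alt s
instance (s : String) (out : Int) : Decidable (Spec_removePalindromeSub s out) := by unfold Spec_removePalindromeSub; infer_instance

-- ===== CLAIM (what is proved, stated in full; the proofs are below) =====
def Claim_equal_removePalindromeSub : Prop := ∀ (s : String), Dom_removePalindromeSub s → Spec_removePalindromeSub s (removePalindromeSub s)

-- ===== LEMMAS AND PROOFS =====

-- element-wise description of A's loop: it reverses the segment [i, j]
theorem pvSwapLoop_get (l : List Char) (i j k : Nat) :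
    (pvSwapLoop l i j)[k]? = if i ≤ k ∧ k ≤ j ∧ j < l.length then l[i + j - k]? else l[k]? := by
  fun_induction pvSwapLoop l i j with
  | case2 l i j h =>
    have : ¬ (i ≤ k ∧ k ≤ j ∧ j < l.length) := by omega
    simp [this]
  | case1 l i j h ih =>
    obtain ⟨hij, hjl⟩ := h
    rw [ih]
    simp only [List.length_set]
    by_cases hik : i = k
    · subst hik
      by_cases hii : i = j
      · subst hii
        have h1 : ¬ (i + 1 ≤ i ∧ i ≤ i - 1 ∧ i - 1 < l.length) := by omega
        have h2 : (i ≤ i ∧ i ≤ i ∧ i < l.length) := by omega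
        simp only [if_neg h1, if_pos h2]
        rw [List.getElem?_set_self (by simpa using hjl)]
        have : i + i - i = i := by omega
        rw [this, List.getD_eq_getElem l ' ' hjl, List.getElem?_eq_getElem hjl]
      · have h1 : ¬ (i + 1 ≤ i ∧ i ≤ j - 1 ∧ j - 1 < l.length) := by omega
        have h2 : (i ≤ i ∧ i ≤ j ∧ j < l.length) := by omega
        simp only [if_neg h1, if_pos h2]
        rw [List.getElem?_set_ne (by omega), List.getElem?_set_self (by omega)]
        have : i + j - i = j := by omega
        rw [this, List.getD_eq_getElem l ' ' hjl, List.getElem?_eq_getElem hjl]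
    · by_cases hjk : k = j
      · subst hjk
        by_cases hkk : i = k
        · omega
        · have h1 : ¬ (i + 1 ≤ k ∧ k ≤ k - 1 ∧ k - 1 < l.length) := by omega
          have h2 : (i ≤ k ∧ k ≤ k ∧ k < l.length) := by omega
          simp only [if_neg h1, if_pos h2]
          rw [List.getElem?_set_self (by simp [List.length_set]; omega)]
          have : i + k - k = i := by omega
          rw [this, List.getD_eq_getElem l ' ' (by omega), List.getElem?_eq_getElem (by omega)]
      · -- k is neither i nor j
        by_cases hmid : i + 1 ≤ k ∧ k ≤ j - 1 ∧ j - 1 < l.length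
        · have h2 : (i ≤ k ∧ k ≤ j ∧ j < l.length) := by omega
          simp only [if_pos hmid, if_pos h2]
          have e : i + 1 + (j - 1) - k = i + j - k := by omega
          rw [e, List.getElem?_set_ne (by omega), List.getElem?_set_ne (by omega)]
        · have h2 : ¬ (i ≤ k ∧ k ≤ j ∧ j < l.length) := by omega
          simp only [if_neg hmid, if_neg h2]
          rw [List.getElem?_set_ne (by omega), List.getElem?_set_ne (by omega)]

-- A's reversed copy equals the original iff every mirrored pair agrees
theorem pvSwapEq_iff (l : List Char) (hl : l ≠ []) :
    pvSwapLoop l 0 (l.length - 1) = l ↔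
      ∀ k, k < l.length → l.getD k ' ' = l.getD (l.length - 1 - k) ' ' := by
  have hlen : 0 < l.length := List.length_pos_iff.mpr hl
  constructor
  · intro heq k hk
    have := congrArg (fun t => t[k]?) heq
    simp only at this
    rw [pvSwapLoop_get] at this
    have hc : (0 ≤ k ∧ k ≤ l.length - 1 ∧ l.length - 1 < l.length) := by omega
    rw [if_pos hc] at this
    have e : 0 + (l.length - 1) - k = l.length - 1 - k := by omega
    rw [e] at this
    rw [List.getD_eq_getElem l ' ' hk, List.getD_eq_getElem l ' ' (by omega)]
    have := this.symm
    rw [List.getElem?_eq_getElem hk, List.getElem?_eq_getElem (show l.length - 1 - k < l.length by omega)] at this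
    exact (Option.some_inj.mp this)
  · intro hall
    apply List.ext_getElem?
    intro k
    rw [pvSwapLoop_get]
    by_cases hc : (0 ≤ k ∧ k ≤ l.length - 1 ∧ l.length - 1 < l.length)
    · rw [if_pos hc]
      have hk : k < l.length := by omega
      have e : 0 + (l.length - 1) - k = l.length - 1 - k := by omega
      rw [e]
      have := hall k hk
      rw [List.getD_eq_getElem l ' ' hk, List.getD_eq_getElem l ' ' (by omega)] at this
      rw [List.getElem?_eq_getElem hk, List.getElem?_eq_getElem (show l.length - 1 - k < l.length by omega), this]
    · rw [if_neg hc]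

-- B's half-range `all` decides the same full mirror condition
theorem pvAll_iff (l : List Char) :
    ((List.range (l.length / 2)).all
        (fun k => l.getD k ' ' == l.getD (l.length - 1 - k) ' ') = true) ↔
      ∀ k, k < l.length → l.getD k ' ' = l.getD (l.length - 1 - k) ' ' := by
  rw [List.all_eq_true]
  simp only [List.mem_range, beq_iff_eq]
  constructor
  · intro h k hk
    by_cases h1 : k < l.length / 2
    · exact h k h1
    · by_cases h2 : l.length - 1 - k < l.length / 2
      · have := h (l.length - 1 - k) h2
        have e : l.length - 1 - (l.length - 1 - k) = k := by omega
        rw [e] at this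
        exact this.symm
      · have : k = l.length - 1 - k := by omega
        rw [← this]
  · intro h k hk
    exact h k (by omega)

theorem main_eq (s : String) : removePalindromeSub s = removePalindromeSub_alt s := by
  unfold removePalindromeSub removePalindromeSub_alt
  by_cases hl : s.toList = []
  · rw [hl]
    simp [pvSwapLoop]
  · set l := s.toList with hls
    simp only []
    have hiff := (pvSwapEq_iff l hl).trans (pvAll_iff l).symm
    by_cases hp : pvSwapLoop l 0 (l.length - 1) = l
    · rw [if_pos hp, if_pos (hiff.mp hp)]
    · rw [if_neg hp, if_neg (by intro hc; exact hp (hiff.mpr hc))]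

-- ===== VERDICT (by name: the statement is the Claim_ definition above) =====
theorem removePalindromeSub_spec : Claim_equal_removePalindromeSub := by
  intro s _
  unfold Spec_removePalindromeSub
  exact main_eq s
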